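-- pv_equiv track=rewrite | github.com/DiorChoppa/SystemAnalyses | task3.py | process
-- ===== SOURCE A (Python) =====
-- def all_subordinations(subordination,  nodes, submission_dict):
--     for node in nodes:
--         if node not in subordination:
--             subordination.append(node)
--             if node in submission_dict:
--                 all_subordinations(subordination, submission_dict[node], submission_dict)
--
-- def indirect_subordination(subordination, nodes, submission_dict):
--     for node in nodes:
--         if node in submission_dict:
--             all_subordinations(subordination, submission_dict[node], submission_dict)
--
-- def process(nodes):
--     connections = [[] for i in range(5)]
--     submissions = {}
--     for node in nodes:
--         if node[0] not in connections[0]: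
--             connections[0].append(node[0])
--         if node[1] not in connections[1]:
--             connections[1].append(node[1])
--         if node[0] in submissions:
--             submissions[node[0]].append(node[1])
--         else:
--             submissions[node[0]] = [node[1]]
--
--     for key in submissions:
--         nodes = submissions[key]
--         if len(nodes) > 1:
--             connections[4].extend(nodes)
--         subordination = []
--         indirect_subordination(subordination, submissions[key], submissions)
--         if key not in connections[2] and len(subordination) > 0:
--             connections[2].append(key)
--
--         for node in subordination:
--             if node not in connections[3]:
--                 connections[3].append(node)
--
--     [r.sort() for r in connections]
--     return connections
-- ===== SOURCE B (Python) =====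
-- def process(nodes):
--     submissions = {}
--     for n in nodes:
--         submissions.setdefault(n[0], []).append(n[1])
--     multi = [t for ch in submissions.values() if len(ch) > 1 for t in ch]
--     heads = []
--     reach_all = []
--     for key, ch in submissions.items():
--         # iterative DFS: stack seeded with the flattened grandchildren lists
--         stack = [g for c in ch if c in submissions for g in submissions[c]]
--         stack.reverse()
--         seen = []
--         while stack:
--             x = stack.pop()
--             if x not in seen:
--                 seen.append(x)
--                 if x in submissions:
--                     stack.extend(reversed(submissions[x]))
--         if seen:
--             heads.append(key)
--         for x in seen:
--             if x not in reach_all: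
--                 reach_all.append(x)
--     return [sorted({n[0] for n in nodes}),
--             sorted({n[1] for n in nodes}),
--             sorted(heads),
--             sorted(reach_all),
--             sorted(multi)]
-- ===== Notes on version B (the rewrite author's own statement) =====
-- stated objective: alternative
-- what changed: The two mutually recursive helpers (all_subordinations / indirect_subordination) are replaced by a single iterative DFS over an explicit stack seeded with the flattened grandchildren lists, and the other connection lists are built by set/dict comprehensions instead of membership-test append loops; all five lists are returned sorted as in A.
import Mathlib
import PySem

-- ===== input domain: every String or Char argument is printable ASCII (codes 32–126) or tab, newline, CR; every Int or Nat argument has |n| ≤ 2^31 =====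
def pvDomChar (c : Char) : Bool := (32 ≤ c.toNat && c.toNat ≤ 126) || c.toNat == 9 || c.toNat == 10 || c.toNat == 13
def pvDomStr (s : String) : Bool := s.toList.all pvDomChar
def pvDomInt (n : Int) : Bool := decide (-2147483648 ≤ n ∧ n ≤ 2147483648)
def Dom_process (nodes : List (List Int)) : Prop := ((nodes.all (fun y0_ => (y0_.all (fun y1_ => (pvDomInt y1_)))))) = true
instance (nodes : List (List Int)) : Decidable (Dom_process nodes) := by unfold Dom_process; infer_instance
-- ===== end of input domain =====

-- B replaces A's two recursive subordination helpers by a single iterative stack-based DFS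
-- (same results; objective: alternative decomposition, no speed claim).

-- ===== PORT A =====
-- all_subordinations: the Nat argument is recursion-depth fuel (the Python recursion descends
-- only after appending a dict key, so depth is at most the number of dict keys; process calls
-- it with fuel d.size + 1, which the lemmas below show is always sufficient).
def allSub (d : PySem.Dict Int (List Int)) : Nat → List Int → List Int → List Int
  | 0, sub, _ => sub
  | _ + 1, sub, [] => sub
  | f + 1, sub, n :: ns =>
    if n ∈ sub then allSub d (f + 1) sub ns
    else
      let s := sub ++ [n]
      let s' := if d.contains n then allSub d f s (d.getD n []) else s
      allSub d (f + 1) s' ns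
termination_by f _ ns => (f, ns.length)

-- indirect_subordination (returns the updated subordination list)
def indirectSub (d : PySem.Dict Int (List Int)) (sub : List Int) (ns : List Int) : List Int :=
  ns.foldl (fun sub n => if d.contains n then allSub d (d.size + 1) sub (d.getD n []) else sub) sub

def process (nodes : List (List Int)) : List (List Int) :=
  let p1 := nodes.foldl
    (fun (st : List Int × List Int × PySem.Dict Int (List Int)) node =>
      (if PySem.List.pyGetD node 0 0 ∈ st.1 then st.1 else st.1 ++ [PySem.List.pyGetD node 0 0],
       if PySem.List.pyGetD node 1 0 ∈ st.2.1 then st.2.1 else st.2.1 ++ [PySem.List.pyGetD node 1 0],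
       if st.2.2.contains (PySem.List.pyGetD node 0 0) then
         st.2.2.modify (PySem.List.pyGetD node 0 0) [] (· ++ [PySem.List.pyGetD node 1 0])
       else st.2.2.insert (PySem.List.pyGetD node 0 0) [PySem.List.pyGetD node 1 0]))
    ([], [], PySem.Dict.empty)
  let subs := p1.2.2
  let p2 := subs.keys.foldl
    (fun (st : List Int × List Int × List Int) key =>
      let ns := subs.getD key []
      let c4 := if 1 < ns.length then st.2.2 ++ ns else st.2.2
      let sub := indirectSub subs [] ns
      let c2 := if key ∉ st.1 ∧ sub ≠ [] then st.1 ++ [key] else st.1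
      let c3 := sub.foldl (fun c3 n => if n ∈ c3 then c3 else c3 ++ [n]) st.2.1
      (c2, c3, c4))
    ([], [], [])
  [PySem.List.sorted p1.1 (fun x => x) false,
   PySem.List.sorted p1.2.1 (fun x => x) false,
   PySem.List.sorted p2.1 (fun x => x) false,
   PySem.List.sorted p2.2.1 (fun x => x) false,
   PySem.List.sorted p2.2.2 (fun x => x) false]

-- ===== PORT B =====
-- the while-loop over the explicit stack (head of the list = top of the Python stack);
-- the Nat argument is an iteration-fuel guard, called with more fuel than the loop can consume
def stackLoop (d : PySem.Dict Int (List Int)) : Nat → List Int → List Int → List Int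
  | 0, seen, _ => seen
  | _ + 1, seen, [] => seen
  | f + 1, seen, x :: st =>
    if x ∈ seen then stackLoop d f seen st
    else stackLoop d f (seen ++ [x]) ((if d.contains x then d.getD x [] else []) ++ st)

def process_alt (nodes : List (List Int)) : List (List Int) :=
  let subs := nodes.foldl
    (fun (d : PySem.Dict Int (List Int)) node =>
      d.modify (PySem.List.pyGetD node 0 0) [] (· ++ [PySem.List.pyGetD node 1 0]))
    PySem.Dict.empty
  let multi := (subs.values.filter (fun ch => 1 < ch.length)).flatMap (fun ch => ch)
  let fuelV := (subs.values.map List.length).sum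
  let p := subs.items.foldl
    (fun (st : List Int × List Int) kv =>
      let seeds := (kv.2.filter (fun c => subs.contains c)).flatMap (fun c => subs.getD c [])
      let seen := stackLoop subs (seeds.length + fuelV + 1) [] seeds
      (if seen ≠ [] then st.1 ++ [kv.1] else st.1,
       seen.foldl (fun r x => if x ∈ r then r else r ++ [x]) st.2))
    ([], [])
  [PySem.List.sorted (PySem.Set.ofList (nodes.map (fun n => PySem.List.pyGetD n 0 0))) (fun x => x) false,
   PySem.List.sorted (PySem.Set.ofList (nodes.map (fun n => PySem.List.pyGetD n 1 0))) (fun x => x) false,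
   PySem.List.sorted p.1 (fun x => x) false,
   PySem.List.sorted p.2 (fun x => x) false,
   PySem.List.sorted multi (fun x => x) false]

-- ===== PRECONDITION & SPEC =====
-- Pre_ excludes exactly the inputs on which the Python A raises IndexError:
-- some edge has fewer than two entries, so node[0] or node[1] fails.
def Pre_process (nodes : List (List Int)) : Prop := ∀ node ∈ nodes, 2 ≤ node.length
instance (nodes : List (List Int)) : Decidable (Pre_process nodes) := by unfold Pre_process; infer_instance
def pvWitness_process : List (List Int) := [[1, 2], [2, 3], [1, 4]]
def Spec_process (nodes : List (List Int)) (out : List (List Int)) : Prop := out = process_alt nodes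
instance (nodes : List (List Int)) (out : List (List Int)) : Decidable (Spec_process nodes out) := by unfold Spec_process; infer_instance

-- ===== CLAIM (what is proved, stated in full; the proofs are below) =====
def Claim_equal_process : Prop := ∀ (nodes : List (List Int)), Dom_process nodes → Pre_process nodes → Spec_process nodes (process nodes)

-- ===== LEMMAS AND PROOFS =====

-- generic facts about lengths/sums of "not yet visited" filters
lemma pv_filterlen_mono (l s s' : List Int) (h : ∀ x ∈ s, x ∈ s') :
    (l.filter (fun k => !decide (k ∈ s'))).length ≤ (l.filter (fun k => !decide (k ∈ s))).length := by
  induction l with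
  | nil => simp
  | cons a l ih =>
    rw [List.filter_cons, List.filter_cons]
    by_cases ha' : a ∈ s'
    · rw [if_neg (by simp [ha'])]
      by_cases ha : a ∈ s
      · rw [if_neg (by simp [ha])]; exact ih
      · rw [if_pos (by simp [ha])]; simp only [List.length_cons]; omega
    · have ha : a ∉ s := fun hc => ha' (h a hc)
      rw [if_pos (by simp [ha']), if_pos (by simp [ha])]
      simp only [List.length_cons]; omega

lemma pv_filtersum_mono (F : Int → Nat) (l s s' : List Int) (h : ∀ x ∈ s, x ∈ s') :
    ((l.filter (fun k => !decide (k ∈ s'))).map F).sum ≤ ((l.filter (fun k => !decide (k ∈ s))).map F).sum := by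
  induction l with
  | nil => simp
  | cons a l ih =>
    rw [List.filter_cons, List.filter_cons]
    by_cases ha' : a ∈ s'
    · rw [if_neg (by simp [ha'])]
      by_cases ha : a ∈ s
      · rw [if_neg (by simp [ha])]; exact ih
      · rw [if_pos (by simp [ha])]; simp only [List.map_cons, List.sum_cons]; omega
    · have ha : a ∉ s := fun hc => ha' (h a hc)
      rw [if_pos (by simp [ha']), if_pos (by simp [ha])]
      simp only [List.map_cons, List.sum_cons]; omega

lemma pv_filterlen_drop (l s : List Int) (x : Int) (hx : x ∈ l) (hxs : x ∉ s) :
    (l.filter (fun k => !decide (k ∈ s ++ [x]))).length < (l.filter (fun k => !decide (k ∈ s))).length := by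
  induction l with
  | nil => cases hx
  | cons a l ih =>
    rw [List.filter_cons, List.filter_cons]
    by_cases hax : a = x
    · subst hax
      rw [if_neg (by simp), if_pos (by simp [hxs])]
      have h1 := pv_filterlen_mono l s (s ++ [a]) (fun y hy => by simp [hy])
      simp only [List.length_cons]; omega
    · have hx' : x ∈ l := by cases hx with | head => exact absurd rfl hax | tail _ h => exact h
      have h2 := ih hx'
      by_cases ha : a ∈ s
      · rw [if_neg (by simp [List.mem_append, ha]), if_neg (by simp [ha])]
        exact h2
      · rw [if_pos (by simp [List.mem_append, ha, hax]), if_pos (by simp [ha])]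
        simp only [List.length_cons]; omega

lemma pv_filtersum_drop (F : Int → Nat) (l s : List Int) (x : Int) (hx : x ∈ l) (hxs : x ∉ s) :
    ((l.filter (fun k => !decide (k ∈ s ++ [x]))).map F).sum + F x
      ≤ ((l.filter (fun k => !decide (k ∈ s))).map F).sum := by
  induction l with
  | nil => cases hx
  | cons a l ih =>
    rw [List.filter_cons, List.filter_cons]
    by_cases hax : a = x
    · subst hax
      rw [if_neg (by simp), if_pos (by simp [hxs])]
      have h1 := pv_filtersum_mono F l s (s ++ [a]) (fun y hy => by simp [hy])
      simp only [List.map_cons, List.sum_cons]; omega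
    · have hx' : x ∈ l := by cases hx with | head => exact absurd rfl hax | tail _ h => exact h
      have h2 := ih hx'
      by_cases ha : a ∈ s
      · rw [if_neg (by simp [List.mem_append, ha]), if_neg (by simp [ha])]
        exact h2
      · rw [if_pos (by simp [List.mem_append, ha, hax]), if_pos (by simp [ha])]
        simp only [List.map_cons, List.sum_cons]; omega

-- number of dict keys not yet collected / total size of their value lists
def missK (d : PySem.Dict Int (List Int)) (sub : List Int) : Nat :=
  (d.keys.filter (fun k => !decide (k ∈ sub))).length

def wsum (d : PySem.Dict Int (List Int)) (seen : List Int) : Nat :=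
  ((d.keys.filter (fun k => !decide (k ∈ seen))).map (fun k => (d.getD k []).length)).sum

lemma missK_mono (d : PySem.Dict Int (List Int)) {s s' : List Int} (h : s ⊆ s') :
    missK d s' ≤ missK d s := pv_filterlen_mono _ _ _ (fun x hx => h hx)

lemma missK_drop (d : PySem.Dict Int (List Int)) {s : List Int} {x : Int}
    (hx : x ∈ d.keys) (hxs : x ∉ s) : missK d (s ++ [x]) < missK d s :=
  pv_filterlen_drop _ _ _ hx hxs

lemma wsum_mono (d : PySem.Dict Int (List Int)) {s s' : List Int} (h : s ⊆ s') :
    wsum d s' ≤ wsum d s := pv_filtersum_mono _ _ _ _ (fun x hx => h hx)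

lemma wsum_drop (d : PySem.Dict Int (List Int)) {s : List Int} {x : Int}
    (hx : x ∈ d.keys) (hxs : x ∉ s) :
    wsum d (s ++ [x]) + (d.getD x []).length ≤ wsum d s :=
  pv_filtersum_drop _ _ _ _ hx hxs

lemma missK_lt_size (d : PySem.Dict Int (List Int)) (sub : List Int) :
    missK d sub < d.size + 1 := by
  have h1 : (d.keys.filter (fun k => !decide (k ∈ sub))).length ≤ d.keys.length :=
    List.length_filter_le _ _
  have h2 : d.keys.length = d.size := by
    show (d.items.map (·.1)).length = d.items.length
    simp
  unfold missK
  omega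

lemma subset_allSub (d : PySem.Dict Int (List Int)) :
    ∀ (f : Nat) (sub ns : List Int), sub ⊆ allSub d f sub ns := by
  intro f
  induction f with
  | zero => intro sub ns; simp [allSub]
  | succ f ihf =>
    intro sub ns
    induction ns generalizing sub with
    | nil => simp [allSub]
    | cons n ns ihn =>
      rw [allSub]
      by_cases hn : n ∈ sub
      · simpa [hn] using ihn sub
      · simp only [hn, if_false]
        refine List.Subset.trans ?_ (ihn _)
        by_cases hc : d.contains n
        · simp only [hc, if_true]
          exact List.Subset.trans (List.subset_append_left _ _) (ihf _ _)
        · simp only [hc, if_false]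
          exact List.subset_append_left _ _

-- fuel irrelevance for the two loops, once the fuel exceeds the natural bound
lemma stackLoop_fuel (d : PySem.Dict Int (List Int)) :
    ∀ (f g : Nat) (seen st : List Int), st.length + wsum d seen < f → st.length + wsum d seen < g →
    stackLoop d f seen st = stackLoop d g seen st := by
  intro f
  induction f with
  | zero => intro g seen st h1 _; exact absurd h1 (by omega)
  | succ f ih =>
    intro g seen st h1 h2
    cases g with
    | zero => exact absurd h2 (by omega)
    | succ g =>
      cases st with
      | nil => rfl
      | cons x st =>
        simp only [stackLoop]
        by_cases hx : x ∈ seen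
        · simp only [hx, if_true]
          simp only [List.length_cons] at h1 h2
          exact ih g seen st (by omega) (by omega)
        · simp only [hx, if_false]
          by_cases hc : d.contains x
          · have hk : x ∈ d.keys := (PySem.Dict.contains_iff_mem_keys d x).1 hc
            have hw := wsum_drop d hk hx
            simp only [if_pos hc]
            simp only [List.length_cons] at h1 h2
            exact ih g _ _ (by simp only [List.length_append]; omega)
              (by simp only [List.length_append]; omega)
          · have hw := wsum_mono d (List.subset_append_left seen [x])
            simp only [if_neg hc, List.nil_append]
            simp only [List.length_cons] at h1 h2
            exact ih g _ _ (by omega) (by omega)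

-- the stack loop with its canonical sufficient fuel
def BLim (d : PySem.Dict Int (List Int)) (seen st : List Int) : List Int :=
  stackLoop d (st.length + wsum d seen + 1) seen st

lemma BLim_nil (d : PySem.Dict Int (List Int)) (seen : List Int) : BLim d seen [] = seen := rfl

lemma BLim_skip (d : PySem.Dict Int (List Int)) (seen : List Int) (x : Int) (st : List Int)
    (hx : x ∈ seen) : BLim d seen (x :: st) = BLim d seen st := by
  unfold BLim
  have hfuel : (x :: st).length + wsum d seen + 1 = (st.length + wsum d seen + 1) + 1 := by
    simp only [List.length_cons]; omega
  rw [hfuel]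
  simp only [stackLoop, hx, if_true]

lemma BLim_visit (d : PySem.Dict Int (List Int)) (seen : List Int) (x : Int) (st : List Int)
    (hx : x ∉ seen) :
    BLim d seen (x :: st) = BLim d (seen ++ [x]) ((if d.contains x then d.getD x [] else []) ++ st) := by
  unfold BLim
  have hfuel : (x :: st).length + wsum d seen + 1 = (st.length + wsum d seen + 1) + 1 := by
    simp only [List.length_cons]; omega
  rw [hfuel]
  simp only [stackLoop, hx, if_false]
  apply stackLoop_fuel
  · by_cases hc : d.contains x
    · have hk := (PySem.Dict.contains_iff_mem_keys d x).1 hc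
      have hw := wsum_drop d hk hx
      simp only [if_pos hc, List.length_append]
      omega
    · have hw := wsum_mono d (List.subset_append_left seen [x])
      simp only [if_neg hc, List.nil_append]
      omega
  · omega

-- the simulation: the stack loop consumes a block of pending nodes exactly as
-- A's recursive all_subordinations does
lemma pv_sim (d : PySem.Dict Int (List Int)) :
    ∀ (f : Nat) (sub ns st : List Int), missK d sub < f →
    BLim d sub (ns ++ st) = BLim d (allSub d f sub ns) st := by
  intro f
  induction f with
  | zero => intro sub ns st h; exact absurd h (by omega)
  | succ f ihf =>
    intro sub ns
    induction ns generalizing sub with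
    | nil => intro st h; rw [allSub, List.nil_append]
    | cons n ns ihn =>
      intro st h
      rw [allSub]
      by_cases hn : n ∈ sub
      · simp only [hn, if_true]
        rw [List.cons_append, BLim_skip d sub n _ hn]
        exact ihn sub st h
      · simp only [hn, if_false]
        rw [List.cons_append, BLim_visit d sub n _ hn]
        by_cases hc : d.contains n
        · have hk := (PySem.Dict.contains_iff_mem_keys d n).1 hc
          have hd := missK_drop d hk hn
          simp only [if_pos hc]
          rw [ihf (sub ++ [n]) (d.getD n []) (ns ++ st) (by omega)]
          have h3 := missK_mono d (subset_allSub d f (sub ++ [n]) (d.getD n []))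
          exact ihn _ st (by omega)
        · simp only [if_neg hc, List.nil_append]
          have hmono := missK_mono d (List.subset_append_left sub [n])
          exact ihn _ st (by omega)

-- iterating over the children (A's indirect_subordination) = seeding the stack with
-- the flattened grandchildren lists (B)
lemma pv_seeds_sim (d : PySem.Dict Int (List Int)) :
    ∀ (ch sub st : List Int),
    BLim d sub (((ch.filter (fun c => d.contains c)).flatMap (fun c => d.getD c [])) ++ st)
      = BLim d (indirectSub d sub ch) st := by
  intro ch
  induction ch with
  | nil => intro sub st; simp [indirectSub]
  | cons c ch ih =>
    intro sub st
    rw [List.filter_cons]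
    by_cases hc : d.contains c
    · rw [if_pos (by simpa using hc), List.flatMap_cons, List.append_assoc]
      rw [pv_sim d (d.size + 1) sub (d.getD c []) _ (missK_lt_size d sub)]
      have hstep : indirectSub d sub (c :: ch)
          = indirectSub d (allSub d (d.size + 1) sub (d.getD c [])) ch := by
        simp [indirectSub, hc]
      rw [hstep]
      exact ih _ _
    · rw [if_neg (by simpa using hc)]
      have hstep : indirectSub d sub (c :: ch) = indirectSub d sub ch := by
        simp [indirectSub, hc]
      rw [hstep]
      exact ih _ _

lemma pv_wsum_nil (d : PySem.Dict Int (List Int)) (hnd : d.keys.Nodup) :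
    wsum d [] = (d.values.map List.length).sum := by
  unfold wsum
  rw [PySem.Dict.values_eq_map_keys d hnd []]
  simp [Function.comp_def]

-- B's per-key stack run computes exactly A's per-key subordination list
lemma pv_stack_eq_indirect (d : PySem.Dict Int (List Int)) (hnd : d.keys.Nodup) (ch : List Int) :
    stackLoop d
        (((ch.filter (fun c => d.contains c)).flatMap (fun c => d.getD c [])).length
          + (d.values.map List.length).sum + 1)
        [] ((ch.filter (fun c => d.contains c)).flatMap (fun c => d.getD c []))
      = indirectSub d [] ch := by
  rw [← pv_wsum_nil d hnd]
  show BLim d [] _ = _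
  have h := pv_seeds_sim d ch [] []
  rw [List.append_nil] at h
  rw [h, BLim_nil]

-- splitting A's one-pass folds into independent component folds
lemma pv_phase1_split (nodes : List (List Int)) (c0 c1 : List Int) (dd : PySem.Dict Int (List Int)) :
    nodes.foldl
      (fun (st : List Int × List Int × PySem.Dict Int (List Int)) node =>
        (if PySem.List.pyGetD node 0 0 ∈ st.1 then st.1 else st.1 ++ [PySem.List.pyGetD node 0 0],
         if PySem.List.pyGetD node 1 0 ∈ st.2.1 then st.2.1 else st.2.1 ++ [PySem.List.pyGetD node 1 0],
         if st.2.2.contains (PySem.List.pyGetD node 0 0) then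
           st.2.2.modify (PySem.List.pyGetD node 0 0) [] (· ++ [PySem.List.pyGetD node 1 0])
         else st.2.2.insert (PySem.List.pyGetD node 0 0) [PySem.List.pyGetD node 1 0]))
      (c0, c1, dd)
      = (nodes.foldl (fun c0 node => if PySem.List.pyGetD node 0 0 ∈ c0 then c0 else c0 ++ [PySem.List.pyGetD node 0 0]) c0,
         nodes.foldl (fun c1 node => if PySem.List.pyGetD node 1 0 ∈ c1 then c1 else c1 ++ [PySem.List.pyGetD node 1 0]) c1,
         nodes.foldl (fun d node =>
           if d.contains (PySem.List.pyGetD node 0 0) then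
             d.modify (PySem.List.pyGetD node 0 0) [] (· ++ [PySem.List.pyGetD node 1 0])
           else d.insert (PySem.List.pyGetD node 0 0) [PySem.List.pyGetD node 1 0]) dd) := by
  induction nodes generalizing c0 c1 dd with
  | nil => rfl
  | cons node nodes ih => simp only [List.foldl_cons]; exact ih _ _ _

lemma pv_phase2_split (d : PySem.Dict Int (List Int)) (l : List Int) (c2 c3 c4 : List Int) :
    l.foldl
      (fun (st : List Int × List Int × List Int) key =>
        (if key ∉ st.1 ∧ indirectSub d [] (d.getD key []) ≠ [] then st.1 ++ [key] else st.1,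
         (indirectSub d [] (d.getD key [])).foldl (fun c3 n => if n ∈ c3 then c3 else c3 ++ [n]) st.2.1,
         if 1 < (d.getD key []).length then st.2.2 ++ d.getD key [] else st.2.2))
      (c2, c3, c4)
      = (l.foldl (fun c2 key => if key ∉ c2 ∧ indirectSub d [] (d.getD key []) ≠ [] then c2 ++ [key] else c2) c2,
         l.foldl (fun c3 key => (indirectSub d [] (d.getD key [])).foldl (fun c3 n => if n ∈ c3 then c3 else c3 ++ [n]) c3) c3,
         l.foldl (fun c4 key => if 1 < (d.getD key []).length then c4 ++ d.getD key [] else c4) c4) := by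
  induction l generalizing c2 c3 c4 with
  | nil => rfl
  | cons key l ih => simp only [List.foldl_cons]; exact ih _ _ _

-- A's dedup-append loop is Python's set(...) of the mapped values
lemma pv_dedup_eq_set (f : List Int → Int) (nodes : List (List Int)) :
    nodes.foldl (fun c n => if f n ∈ c then c else c ++ [f n]) []
      = PySem.Set.ofList (nodes.map f) := by
  rw [PySem.Set.ofList_eq_foldl, List.foldl_map]
  apply PySem.List.foldl_congr_mem
  intro acc x _
  by_cases h : f x ∈ acc
  · simp [PySem.Set.add, List.contains_eq_mem, h]
  · simp [PySem.Set.add, List.contains_eq_mem, h]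

-- A's insert-or-append dict loop is B's setdefault/modify loop
lemma pv_dict_eq (nodes : List (List Int)) (d0 : PySem.Dict Int (List Int)) :
    nodes.foldl (fun d node =>
        if d.contains (PySem.List.pyGetD node 0 0) then
          d.modify (PySem.List.pyGetD node 0 0) [] (· ++ [PySem.List.pyGetD node 1 0])
        else d.insert (PySem.List.pyGetD node 0 0) [PySem.List.pyGetD node 1 0]) d0
      = nodes.foldl (fun d node =>
          d.modify (PySem.List.pyGetD node 0 0) [] (· ++ [PySem.List.pyGetD node 1 0])) d0 := by
  apply PySem.List.foldl_congr_mem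
  intro d node _
  by_cases h : d.contains (PySem.List.pyGetD node 0 0)
  · simp only [if_pos h]
  · have h' : d.contains (PySem.List.pyGetD node 0 0) = false := by simpa using h
    simp only [if_neg h]
    show d.insert _ [_] = d.insert _ (d.getD _ [] ++ [_])
    rw [PySem.Dict.getD_of_not_contains d [] h']
    rfl

lemma pv_flatMap_filter (p : Int → Bool) (g : Int → List Int) (l : List Int) :
    (l.filter p).flatMap g = l.flatMap (fun k => if p k then g k else []) := by
  induction l with
  | nil => rfl
  | cons a l ih =>
    rw [List.filter_cons]
    by_cases h : p a
    · rw [if_pos h, List.flatMap_cons, List.flatMap_cons, if_pos h, ih]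
    · rw [if_neg h, List.flatMap_cons, if_neg h, List.nil_append, ih]

-- A's extend loop over keys = B's filtered flatMap over values
lemma pv_c4_eq (d : PySem.Dict Int (List Int)) (hnd : d.keys.Nodup) :
    d.keys.foldl (fun c4 key => if 1 < (d.getD key []).length then c4 ++ d.getD key [] else c4) []
      = (d.values.filter (fun ch => 1 < ch.length)).flatMap (fun ch => ch) := by
  rw [PySem.Dict.values_eq_map_keys d hnd [], List.filter_map, List.flatMap_map]
  rw [pv_flatMap_filter]
  rw [PySem.List.foldl_congr_mem _ _
      (fun c4 key => c4 ++ if 1 < (d.getD key []).length then d.getD key [] else []) _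
      (by intro acc x _; by_cases h : 1 < (d.getD x []).length
          · simp only [if_pos h]
          · simp only [if_neg h, List.append_nil])]
  rw [PySem.List.foldl_append_eq_flatMap]
  rw [List.nil_append]
  apply List.flatMap_congr  -- might not exist; fallback below
  intro k _
  by_cases h : 1 < (d.getD k []).length
  · rw [if_pos h, if_pos (by simpa [Function.comp] using h)]
  · rw [if_neg h, if_neg (by simpa [Function.comp] using h)]

-- on a Nodup key list starting from a disjoint accumulator, A's "key not in c2" test is always true
lemma pv_fold_mem_cond (P : Int → Prop) [DecidablePred P] :
    ∀ (l acc : List Int), l.Nodup → (∀ k ∈ l, k ∉ acc) →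
    l.foldl (fun c k => if k ∉ c ∧ P k then c ++ [k] else c) acc
      = l.foldl (fun c k => if P k then c ++ [k] else c) acc := by
  intro l
  induction l with
  | nil => intro acc _ _; rfl
  | cons a l ih =>
    intro acc hnd hacc
    simp only [List.foldl_cons]
    have ha : a ∉ acc := hacc a List.mem_cons_self
    by_cases hP : P a
    · rw [if_pos ⟨ha, hP⟩, if_pos hP]
      refine ih (acc ++ [a]) (List.nodup_cons.mp hnd).2 ?_
      intro k hk
      simp only [List.mem_append, List.mem_singleton]
      rintro (h | rfl)
      · exact hacc k (List.mem_cons_of_mem _ hk) h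
      · exact (List.nodup_cons.mp hnd).1 hk
    · rw [if_neg (fun hh => hP hh.2), if_neg hP]
      exact ih acc (List.nodup_cons.mp hnd).2 (fun k hk => hacc k (List.mem_cons_of_mem _ hk))

-- splitting B's items loop into the heads fold and the reach fold over the keys
lemma pv_phaseB_split (d : PySem.Dict Int (List Int)) (hnd : d.keys.Nodup) (h0 r0 : List Int) :
    d.items.foldl
      (fun (st : List Int × List Int) kv =>
        (if stackLoop d
              (((kv.2.filter (fun c => d.contains c)).flatMap (fun c => d.getD c [])).length
                + (d.values.map List.length).sum + 1)
              [] ((kv.2.filter (fun c => d.contains c)).flatMap (fun c => d.getD c [])) ≠ []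
         then st.1 ++ [kv.1] else st.1,
         (stackLoop d
              (((kv.2.filter (fun c => d.contains c)).flatMap (fun c => d.getD c [])).length
                + (d.values.map List.length).sum + 1)
              [] ((kv.2.filter (fun c => d.contains c)).flatMap (fun c => d.getD c []))).foldl
           (fun r x => if x ∈ r then r else r ++ [x]) st.2))
      (h0, r0)
      = (d.keys.foldl (fun h k => if indirectSub d [] (d.getD k []) ≠ [] then h ++ [k] else h) h0,
         d.keys.foldl (fun r k =>
           (indirectSub d [] (d.getD k [])).foldl (fun r x => if x ∈ r then r else r ++ [x]) r) r0) := by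
  have hse := pv_stack_eq_indirect d hnd
  rw [PySem.Dict.items_eq_map_keys d hnd [], List.foldl_map]
  refine (PySem.List.foldl_prod_mk
      (fun h y => if stackLoop d
            ((((d.getD y []).filter (fun c => d.contains c)).flatMap (fun c => d.getD c [])).length
              + (d.values.map List.length).sum + 1)
            [] (((d.getD y []).filter (fun c => d.contains c)).flatMap (fun c => d.getD c [])) ≠ []
        then h ++ [y] else h)
      (fun r y => (stackLoop d
            ((((d.getD y []).filter (fun c => d.contains c)).flatMap (fun c => d.getD c [])).length
              + (d.values.map List.length).sum + 1)
            [] (((d.getD y []).filter (fun c => d.contains c)).flatMap (fun c => d.getD c []))).foldl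
          (fun r x => if x ∈ r then r else r ++ [x]) r)
      d.keys h0 r0).trans ?_
  refine congrArg₂ Prod.mk ?_ ?_
  · apply PySem.List.foldl_congr_mem
    intro acc y _
    rw [hse]
  · apply PySem.List.foldl_congr_mem
    intro acc y _
    rw [hse]

lemma pv_main (nodes : List (List Int)) : Spec_process nodes (process nodes) := by
  unfold Spec_process
  show process nodes = process_alt nodes
  simp only [process, process_alt]
  rw [pv_phase1_split]
  dsimp only
  rw [pv_dict_eq]
  have hnd : (nodes.foldl (fun d node =>
      d.modify (PySem.List.pyGetD node 0 0) [] (· ++ [PySem.List.pyGetD node 1 0]))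
      (PySem.Dict.empty : PySem.Dict Int (List Int))).keys.Nodup :=
    PySem.Dict.nodup_keys_foldl_modify_key nodes _ [] (fun _ node => (· ++ [PySem.List.pyGetD node 1 0]))
      PySem.Dict.empty PySem.Dict.nodup_keys_empty
  rw [pv_phase2_split]
  rw [pv_phaseB_split _ hnd]
  dsimp only
  simp only [pv_dedup_eq_set]
  rw [pv_c4_eq _ hnd]
  rw [pv_fold_mem_cond _ _ [] hnd (by intro k _; exact List.not_mem_nil)]


-- ===== VERDICT (by name: the statement is the Claim_ definition above) =====
theorem process_spec : Claim_equal_process := by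
  intro nodes _ _
  exact pv_main nodes
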